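-- pv_equiv track=rewrite | github.com/consistentJake/AgenticRecommender | agentic_recommender/evaluation/repeat_evaluator.py | _extract_items_from_text
-- ===== SOURCE A (Python) =====
-- from typing import Dict, List, Any, Optional, Set, Tuple
--
-- def _extract_items_from_text(
--
--     text: str,
--     candidates: List[str],
-- ) -> List[str]:
--     """Extract candidate mentions from text as fallback."""
--     text_lower = text.lower()
--     found = []
--     seen = set()
--
--     for candidate in candidates:
--         if candidate.lower() in text_lower and candidate.lower() not in seen:
--             found.append(candidate)
--             seen.add(candidate.lower())
--
--     for c in candidates:
--         if c.lower() not in seen: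
--             found.append(c)
--
--     return found
-- ===== SOURCE B (Python) =====
-- def _extract_items_from_text(text, candidates):
--     """Single pass: partition candidates into present-in-text (deduped by
--     lowercase, first occurrence kept) and absent ones, then concatenate."""
--     t = text.lower()
--     present, absent, seen = [], [], set()
--     for c in candidates:
--         low = c.lower()
--         if low in t:
--             if low not in seen:
--                 present.append(c)
--                 seen.add(low)
--         else:
--             absent.append(c)
--     return present + absent
-- ===== Notes on version B (the rewrite author's own statement) =====
-- stated objective: simpler
-- what changed: Replaces A's two sequential passes (collect present candidates into found+seen, then rescan all candidates against the final seen set) with one pass that partitions candidates into a present list (deduped by lowercase) and an absent list, lowering and substring-testing each candidate once instead of up to four lower() calls and two substring scans.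
import Mathlib
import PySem

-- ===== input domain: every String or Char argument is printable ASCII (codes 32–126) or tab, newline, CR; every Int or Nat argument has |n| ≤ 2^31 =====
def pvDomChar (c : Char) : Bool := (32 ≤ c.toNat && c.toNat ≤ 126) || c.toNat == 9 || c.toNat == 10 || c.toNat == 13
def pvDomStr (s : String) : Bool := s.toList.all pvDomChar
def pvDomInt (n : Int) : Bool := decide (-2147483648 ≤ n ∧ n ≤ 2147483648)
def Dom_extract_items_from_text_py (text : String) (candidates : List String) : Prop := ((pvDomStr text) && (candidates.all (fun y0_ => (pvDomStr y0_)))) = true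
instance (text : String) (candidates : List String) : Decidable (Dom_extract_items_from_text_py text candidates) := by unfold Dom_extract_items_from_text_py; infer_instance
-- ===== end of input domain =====

-- B replaces A's two sequential passes with one pass that partitions the candidates
-- into a present list (deduped by lowercase) and an absent list (objective: simpler).

-- ===== PORT A =====
-- body of A's first loop: append candidate to found / its lowercase to seen when present and new
def pvStepA1 (tl : String) (p : List String × PySem.Set String) (candidate : String) :
    List String × PySem.Set String :=
  if PySem.Str.isIn (PySem.Str.lower candidate) tl
      && !(PySem.Set.contains p.2 (PySem.Str.lower candidate)) then
    (p.1 ++ [candidate], PySem.Set.add p.2 (PySem.Str.lower candidate))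
  else p

-- body of A's second loop: append c when its lowercase is not in the (final) seen set
def pvStepA2 (seen : PySem.Set String) (found : List String) (c : String) : List String :=
  if !(PySem.Set.contains seen (PySem.Str.lower c)) then found ++ [c] else found

def extract_items_from_text_py (text : String) (candidates : List String) : List String :=
  let text_lower := PySem.Str.lower text
  let fs := candidates.foldl (pvStepA1 text_lower) ([], PySem.Set.empty)
  candidates.foldl (pvStepA2 fs.2) fs.1

-- ===== PORT B =====
-- body of B's single loop over (present, absent, seen)
def pvStepB (t : String) (p : List String × List String × PySem.Set String) (c : String) :
    List String × List String × PySem.Set String :=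
  let low := PySem.Str.lower c
  if PySem.Str.isIn low t then
    if PySem.Set.contains p.2.2 low then p
    else (p.1 ++ [c], p.2.1, PySem.Set.add p.2.2 low)
  else (p.1, p.2.1 ++ [c], p.2.2)

def extract_items_from_text_py_alt (text : String) (candidates : List String) : List String :=
  let t := PySem.Str.lower text
  let r := candidates.foldl (pvStepB t) ([], [], PySem.Set.empty)
  r.1 ++ r.2.1

-- ===== PRECONDITION & SPEC =====
def Spec_extract_items_from_text_py (text : String) (candidates : List String) (out : List String) : Prop := out = extract_items_from_text_py_alt text candidates
instance (text : String) (candidates : List String) (out : List String) : Decidable (Spec_extract_items_from_text_py text candidates out) := by unfold Spec_extract_items_from_text_py; infer_instance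

-- ===== CLAIM (what is proved, stated in full; the proofs are below) =====
def Claim_equal_extract_items_from_text_py : Prop := ∀ (text : String) (candidates : List String), Dom_extract_items_from_text_py text candidates → Spec_extract_items_from_text_py text candidates (extract_items_from_text_py text candidates)

-- ===== LEMMAS AND PROOFS =====

-- membership in the seen-set after A's first loop: previous members plus the
-- lowercases of processed candidates that occur in the text
theorem pvSeenMem (tl : String) (cs : List String) (p : List String × PySem.Set String)
    (x : String) :
    x ∈ (cs.foldl (pvStepA1 tl) p).2 ↔
      x ∈ p.2 ∨ ∃ c ∈ cs, PySem.Str.lower c = x ∧ PySem.Str.isIn x tl = true := by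
  induction cs generalizing p with
  | nil => simp
  | cons c cs ih =>
    rw [List.foldl_cons, ih, List.exists_mem_cons_iff]
    unfold pvStepA1
    by_cases hin : PySem.Str.isIn (PySem.Str.lower c) tl = true
    · by_cases hs : PySem.Str.lower c ∈ p.2
      · rw [hin, (PySem.Set.contains_iff _ _).2 hs]
        simp only [Bool.not_true, Bool.and_false, Bool.false_eq_true, if_false]
        constructor
        · rintro (h' | h') <;> tauto
        · rintro (h' | ⟨rfl, _⟩ | h')
          · exact Or.inl h'
          · exact Or.inl hs
          · exact Or.inr h'
      · have hcb : PySem.Set.contains p.2 (PySem.Str.lower c) = false := by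
          cases hcon : PySem.Set.contains p.2 (PySem.Str.lower c) with
          | false => rfl
          | true => exact absurd ((PySem.Set.contains_iff _ _).1 hcon) hs
        rw [hin, hcb]
        simp only [Bool.not_false, Bool.and_true, if_true, PySem.Set.mem_add]
        constructor
        · rintro ((h' | rfl) | h')
          · exact Or.inl h'
          · exact Or.inr (Or.inl ⟨rfl, hin⟩)
          · exact Or.inr (Or.inr h')
        · rintro (h' | ⟨rfl, _⟩ | h')
          · exact Or.inl (Or.inl h')
          · exact Or.inl (Or.inr rfl)
          · exact Or.inr h'
    · rw [Bool.not_eq_true] at hin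
      rw [hin]
      simp only [Bool.false_and, Bool.false_eq_true, if_false]
      constructor
      · rintro (h' | h') <;> tauto
      · rintro (h' | ⟨rfl, hx⟩ | h')
        · exact Or.inl h'
        · rw [hx] at hin; cases hin
        · exact Or.inr h'

-- A's second loop over a set agreeing with the substring test appends exactly the absent candidates
theorem pvLoop2 (tl : String) (cs : List String) (f : List String) (sn : PySem.Set String)
    (h : ∀ c ∈ cs, PySem.Set.contains sn (PySem.Str.lower c)
            = PySem.Str.isIn (PySem.Str.lower c) tl) :
    cs.foldl (pvStepA2 sn) f
      = f ++ cs.filter (fun c => !(PySem.Str.isIn (PySem.Str.lower c) tl)) := by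
  induction cs generalizing f with
  | nil => simp
  | cons c cs ih =>
    have hc := h c (List.mem_cons_self)
    rw [List.foldl_cons, List.filter_cons,
      ih _ (fun d hd => h d (List.mem_cons_of_mem _ hd))]
    unfold pvStepA2
    rw [hc]
    by_cases hin : PySem.Str.isIn (PySem.Str.lower c) tl = true
    · rw [hin]
      simp only [Bool.not_true, Bool.false_eq_true, if_false]
    · rw [Bool.not_eq_true] at hin
      rw [hin]
      simp only [Bool.not_false, if_true]
      rw [List.append_assoc]
      rfl

-- B's single pass computes A's first-loop state together with the absent candidates,
-- provided every member of seen occurs in the text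
theorem pvMain (tl : String) (cs : List String) (found absent : List String)
    (seen : PySem.Set String)
    (h : ∀ x, PySem.Set.contains seen x = true → PySem.Str.isIn x tl = true) :
    cs.foldl (pvStepB tl) (found, absent, seen)
      = ((cs.foldl (pvStepA1 tl) (found, seen)).1,
         absent ++ cs.filter (fun c => !(PySem.Str.isIn (PySem.Str.lower c) tl)),
         (cs.foldl (pvStepA1 tl) (found, seen)).2) := by
  induction cs generalizing found absent seen with
  | nil => simp
  | cons c cs ih =>
    simp only [List.foldl_cons, List.filter_cons, pvStepB, pvStepA1]
    by_cases hin : PySem.Str.isIn (PySem.Str.lower c) tl = true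
    · by_cases hs : PySem.Set.contains seen (PySem.Str.lower c) = true
      · simp only [hin, hs, Bool.not_true, Bool.and_false, if_true]
        simpa [hin] using ih found absent seen h
      · simp only [hin, hs, Bool.not_false, Bool.and_true, if_true]
        have h' : ∀ x, PySem.Set.contains (PySem.Set.add seen (PySem.Str.lower c)) x = true →
            PySem.Str.isIn x tl = true := by
          intro x hx
          simp only [PySem.Set.contains_iff, PySem.Set.mem_add] at hx
          rcases hx with hx | rfl
          · exact h x (by simpa [PySem.Set.contains_iff] using hx)
          · exact hin
        simpa [hin] using ih (found ++ [c]) absent (PySem.Set.add seen (PySem.Str.lower c)) h'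
    · simp only [Bool.not_eq_true] at hin
      simp only [hin, Bool.false_and]
      simpa [hin] using ih found (absent ++ [c]) seen h

-- ===== VERDICT (by name: the statement is the Claim_ definition above) =====
theorem extract_items_from_text_py_spec : Claim_equal_extract_items_from_text_py := by
  intro text candidates _
  unfold Spec_extract_items_from_text_py extract_items_from_text_py extract_items_from_text_py_alt
  set tl := PySem.Str.lower text with htl
  have hempty : ∀ x, PySem.Set.contains (PySem.Set.empty (α := String)) x = true →
      PySem.Str.isIn x tl = true := by
    intro x hx
    exact absurd ((PySem.Set.contains_iff _ _).1 hx) (List.not_mem_nil)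
  have hagree : ∀ c ∈ candidates,
      PySem.Set.contains (candidates.foldl (pvStepA1 tl) ([], PySem.Set.empty)).2
          (PySem.Str.lower c)
        = PySem.Str.isIn (PySem.Str.lower c) tl := by
    intro c hc
    by_cases hin : PySem.Str.isIn (PySem.Str.lower c) tl = true
    · rw [hin]
      exact (PySem.Set.contains_iff _ _).2
        ((pvSeenMem tl candidates ([], PySem.Set.empty) (PySem.Str.lower c)).2
          (Or.inr ⟨c, hc, rfl, hin⟩))
    · rw [Bool.not_eq_true] at hin
      rw [hin]
      cases hcon : PySem.Set.contains (candidates.foldl (pvStepA1 tl) ([], PySem.Set.empty)).2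
          (PySem.Str.lower c) with
      | false => rfl
      | true =>
        rcases (pvSeenMem tl candidates ([], PySem.Set.empty) (PySem.Str.lower c)).1
            ((PySem.Set.contains_iff _ _).1 hcon) with hx | ⟨d, _, _, hin'⟩
        · exact absurd hx (List.not_mem_nil)
        · rw [hin'] at hin; cases hin
  rw [pvLoop2 tl candidates _ _ hagree]
  show _ = (candidates.foldl (pvStepB tl) ([], [], PySem.Set.empty)).1
      ++ (candidates.foldl (pvStepB tl) ([], [], PySem.Set.empty)).2.1
  rw [pvMain tl candidates [] [] PySem.Set.empty hempty]
  simp
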